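-- pv_equiv track=rewrite | github.com/haolunc/ARC-RL | reference_solutions/solutions/0b148d64.py | transform
-- ===== SOURCE A (Python) =====
-- def transform(grid):
--
--     counts = {}
--     for row in grid:
--         for val in row:
--             if val != 0:
--                 counts[val] = counts.get(val, 0) + 1
--
--     target_colour = min(counts, key=lambda c: (counts[c], c))
--
--     rows = len(grid)
--     cols = len(grid[0]) if rows else 0
--     min_r, max_r = rows, -1
--     min_c, max_c = cols, -1
--     for r in range(rows):
--         for c in range(cols):
--             if grid[r][c] == target_colour:
--                 if r < min_r: min_r = r
--                 if r > max_r: max_r = r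
--                 if c < min_c: min_c = c
--                 if c > max_c: max_c = c
--
--     out = []
--     for r in range(min_r, max_r + 1):
--         out_row = []
--         for c in range(min_c, max_c + 1):
--             out_row.append(target_colour if grid[r][c] == target_colour else 0)
--         out.append(out_row)
--
--     return out
-- ===== SOURCE B (Python) =====
-- def transform(grid):
--     positions = {}
--     for r, row in enumerate(grid):
--         for c, val in enumerate(row):
--             if val != 0:
--                 positions.setdefault(val, []).append((r, c))
--     target = min(positions, key=lambda v: (len(positions[v]), v))
--     cells = positions[target]
--     r0 = min(r for r, _ in cells)
--     r1 = max(r for r, _ in cells)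
--     c0 = min(c for _, c in cells)
--     c1 = max(c for _, c in cells)
--     cellset = set(cells)
--     return [[target if (r, c) in cellset else 0 for c in range(c0, c1 + 1)]
--             for r in range(r0, r1 + 1)]
-- ===== Notes on version B (the rewrite author's own statement) =====
-- stated objective: alternative
-- what changed: B records the coordinates of every nonzero colour in one pass over the grid, picks the target from that index and reads the bounding box off the target's coordinate list, instead of A's counting pass plus a second full-grid min/max rescan.
-- outside the precondition, e.g. on transform([[0, 1], [0, 1, 2]]): A returns [], B returns [[2]]
import Mathlib
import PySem

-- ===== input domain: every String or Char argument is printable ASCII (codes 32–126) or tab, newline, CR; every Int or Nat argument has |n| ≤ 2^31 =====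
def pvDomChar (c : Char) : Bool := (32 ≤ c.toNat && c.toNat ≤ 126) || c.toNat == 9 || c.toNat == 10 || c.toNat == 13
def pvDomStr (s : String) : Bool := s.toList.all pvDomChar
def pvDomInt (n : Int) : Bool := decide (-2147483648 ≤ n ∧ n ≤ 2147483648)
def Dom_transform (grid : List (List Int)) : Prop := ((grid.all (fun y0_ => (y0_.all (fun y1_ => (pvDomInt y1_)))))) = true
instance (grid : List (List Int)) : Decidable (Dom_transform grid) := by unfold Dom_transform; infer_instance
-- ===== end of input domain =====

-- B indexes every nonzero colour's coordinates in one pass and reads the bounding box off the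
-- target's coordinate list, instead of A's counting pass plus a second full-grid rescan (objective: alternative).

-- ===== PORT A =====
def pvCountsA (grid : List (List Int)) : PySem.Dict Int Int :=
  grid.foldl (fun d row =>
    row.foldl (fun d v => if v ≠ 0 then d.modify v 0 (· + 1) else d) d) PySem.Dict.empty

def pvBoxA (grid : List (List Int)) (target rows cols : Int) : Int × Int × Int × Int :=
  (PySem.List.pyRange 0 rows).foldl (fun st r =>
    (PySem.List.pyRange 0 cols).foldl (fun st c =>
      if PySem.List.pyGetD (PySem.List.pyGetD grid r []) c 0 = target then
        (if r < st.1 then r else st.1,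
         if r > st.2.1 then r else st.2.1,
         if c < st.2.2.1 then c else st.2.2.1,
         if c > st.2.2.2 then c else st.2.2.2)
      else st) st) (rows, -1, cols, -1)

def transform (grid : List (List Int)) : List (List Int) :=
  let counts := pvCountsA grid
  match PySem.List.min2? counts.keys (fun c => counts.getD c 0) (fun c => c) with
  | none => []  -- Python raises ValueError here (min of an empty dict); outside Pre_transform
  | some target =>
    let rows : Int := grid.length
    let cols : Int := if grid.length ≠ 0 then ((PySem.List.pyGetD grid 0 []).length : Int) else 0
    let st := pvBoxA grid target rows cols
    (PySem.List.pyRange st.1 (st.2.1 + 1)).foldl (fun out r =>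
      out ++ [(PySem.List.pyRange st.2.2.1 (st.2.2.2 + 1)).foldl (fun orow c =>
        orow ++ [if PySem.List.pyGetD (PySem.List.pyGetD grid r []) c 0 = target then target else 0]) []]) []

-- ===== PORT B =====
def pvPosB (grid : List (List Int)) : PySem.Dict Int (List (Int × Int)) :=
  (PySem.List.enumerate grid).foldl (fun d p =>
    (PySem.List.enumerate p.2).foldl (fun d q =>
      if q.2 ≠ 0 then d.modify q.2 [] (· ++ [(p.1, q.1)]) else d) d) PySem.Dict.empty

def transform_alt (grid : List (List Int)) : List (List Int) :=
  let positions := pvPosB grid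
  match PySem.List.min2? positions.keys (fun v => ((positions.getD v []).length : Int)) (fun v => v) with
  | none => []  -- Python raises ValueError here (min of an empty dict); outside Pre_transform
  | some target =>
    let cells := positions.getD target []
    let r0 := (PySem.List.min? (cells.map (·.1)) (fun x => x)).getD 0
    let r1 := (PySem.List.max? (cells.map (·.1)) (fun x => x)).getD 0
    let c0 := (PySem.List.min? (cells.map (·.2)) (fun x => x)).getD 0
    let c1 := (PySem.List.max? (cells.map (·.2)) (fun x => x)).getD 0
    let cellset := PySem.Set.ofList cells
    (PySem.List.pyRange r0 (r1 + 1)).map (fun r =>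
      (PySem.List.pyRange c0 (c1 + 1)).map (fun c =>
        if PySem.Set.contains cellset (r, c) then target else 0))

-- ===== PRECONDITION & SPEC =====
-- Pre_ excludes grids with no nonzero value (A's min() raises ValueError, including the empty grid)
-- and jagged grids: rows shorter than the first make A's indexed scan raise IndexError, and rows
-- longer than the first are silently truncated by A's indexed scan, an accident of A's
-- implementation that B does not reproduce (see cites).
def Pre_transform (grid : List (List Int)) : Prop :=
  (∀ row ∈ grid, row.length = (grid.headD []).length) ∧ (∃ row ∈ grid, ∃ v ∈ row, v ≠ 0)
instance (grid : List (List Int)) : Decidable (Pre_transform grid) := by unfold Pre_transform; infer_instance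
def pvWitness_transform : List (List Int) := [[0, 1], [2, 1]]
def Spec_transform (grid : List (List Int)) (out : List (List Int)) : Prop := out = transform_alt grid
instance (grid : List (List Int)) (out : List (List Int)) : Decidable (Spec_transform grid out) := by unfold Spec_transform; infer_instance

-- ===== CLAIM (what is proved, stated in full; the proofs are below) =====
def Claim_equal_transform : Prop := ∀ (grid : List (List Int)), Dom_transform grid → Pre_transform grid → Spec_transform grid (transform grid)

-- ===== LEMMAS AND PROOFS =====

-- the nonzero values of the grid, in reading order
def pvVs (grid : List (List Int)) : List Int := grid.flatten.filter (fun v => v ≠ 0)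

-- every cell of the grid as (value, row index, column index), in reading order
def pvP (grid : List (List Int)) : List (Int × Int × Int) :=
  (PySem.List.enumerate grid).flatMap (fun p => (PySem.List.enumerate p.2).map (fun q => (q.2, p.1, q.1)))

def pvQ (grid : List (List Int)) : List (Int × Int × Int) :=
  (pvP grid).filter (fun u => u.1 ≠ 0)

-- the coordinates of colour t, in reading order
def pvCellsOf (grid : List (List Int)) (t : Int) : List (Int × Int) :=
  ((pvQ grid).filter (fun u => u.1 == t)).map (·.2)

lemma pv_pick_mem {α κ₁ κ₂ : Type} [LT κ₁] [DecidableLT κ₁] [LT κ₂] [DecidableLT κ₂]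
    (k1 : α → κ₁) (k2 : α → κ₂) :
    ∀ (xs : List α) (acc : Option α) (m : α),
      xs.foldl (fun acc x =>
        match acc with
        | none => some x
        | some m' =>
          if (decide (k1 x < k1 m') || !decide (k1 m' < k1 x) && decide (k2 x < k2 m')) = true
          then some x else some m') acc = some m →
      acc = some m ∨ m ∈ xs := by
  intro xs
  induction xs with
  | nil => intro acc m h; exact Or.inl h
  | cons x xs ih =>
    intro acc m h
    simp only [List.foldl_cons] at h
    rcases ih _ m h with h' | h'
    · cases acc with
      | none =>
        simp only [Option.some.injEq] at h'
        exact Or.inr (by simp [h'])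
      | some a =>
        by_cases hc : (decide (k1 x < k1 a) || !decide (k1 a < k1 x) && decide (k2 x < k2 a)) = true
        · simp [hc] at h'
          exact Or.inr (by simp [h'])
        · simp [hc] at h'
          exact Or.inl (by simp [h'])
    · exact Or.inr (List.mem_cons_of_mem _ h')

lemma pv_min2?_mem {α κ₁ κ₂ : Type} [LT κ₁] [DecidableLT κ₁] [LT κ₂] [DecidableLT κ₂]
    {xs : List α} {k1 : α → κ₁} {k2 : α → κ₂} {m : α}
    (h : PySem.List.min2? xs k1 k2 = some m) : m ∈ xs := by
  unfold PySem.List.min2? at h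
  rcases pv_pick_mem k1 k2 xs none m h with h' | h'
  · exact absurd h' (by simp)
  · exact h'

lemma pv_enum_mem {α : Type} (xs : List α) : ∀ (s : Int) (p : Int × α),
    p ∈ PySem.List.enumerate xs s ↔ ∃ k : Nat, k < xs.length ∧ p.1 = s + k ∧ xs[k]? = some p.2 := by
  induction xs with
  | nil => intro s p; simp [PySem.List.enumerate_nil]
  | cons x xs ih =>
    intro s p
    rw [PySem.List.enumerate_cons]
    simp only [List.mem_cons]
    constructor
    · rintro (rfl | hp)
      · exact ⟨0, by simp⟩
      · obtain ⟨k, hk, h1, h2⟩ := (ih (s + 1) p).mp hp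
        refine ⟨k + 1, by simp only [List.length_cons]; omega, by push_cast at h1 ⊢; omega,
          by simpa using h2⟩
    · rintro ⟨k, hk, h1, h2⟩
      cases k with
      | zero =>
        left
        obtain ⟨p1, p2⟩ := p
        simp only [List.getElem?_cons_zero, Option.some.injEq] at h2
        simp only at h1
        simp [h1, ← h2]
      | succ k =>
        right
        refine (ih (s + 1) p).mpr ⟨k, by simp only [List.length_cons] at hk; omega,
          by push_cast at h1 ⊢; omega, by simpa using h2⟩

lemma pv_fold_idx_aux {α σ : Type} (d : α) (g : σ → Int → α → σ) :
    ∀ (xs : List α) (s : Nat) (init : σ),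
      (PySem.List.pyRange (s : Int) ((s : Int) + (xs.length : Int))).foldl
          (fun st i => g st i (PySem.List.pyGetD xs (i - (s : Int)) d)) init
        = (PySem.List.enumerate xs (s : Int)).foldl (fun st q => g st q.1 q.2) init := by
  intro xs
  induction xs with
  | nil =>
    intro s init
    rw [PySem.List.pyRange_one_eq_nil (by simp), PySem.List.enumerate_nil]
    rfl
  | cons x xs ih =>
    intro s init
    have h1 : (s : Int) < (s : Int) + ((x :: xs).length : Int) := by
      have : 0 < ((x :: xs).length : Int) := by exact_mod_cast Nat.succ_pos xs.length
      omega
    rw [PySem.List.pyRange_one_cons h1, PySem.List.enumerate_cons]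
    simp only [List.foldl_cons]
    have hx : PySem.List.pyGetD (x :: xs) ((s : Int) - s) d = x := by
      rw [show (s : Int) - s = ((0 : Nat) : Int) by omega, PySem.List.pyGetD_natCast]
      rfl
    rw [hx]
    have h2 : (s : Int) + ((x :: xs).length : Int) = ((s + 1 : Nat) : Int) + (xs.length : Int) := by
      push_cast [List.length_cons]; ring
    have h3 : (s : Int) + 1 = ((s + 1 : Nat) : Int) := by push_cast; ring
    rw [h2, h3, ← ih (s + 1) (g init (s : Int) x)]
    apply PySem.List.foldl_congr_mem
    intro acc i hi
    obtain ⟨hlo, hhi⟩ := PySem.List.mem_pyRange_one.mp hi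
    obtain ⟨k, hkk⟩ : ∃ k : Nat, i - ((s + 1 : Nat) : Int) = (k : Int) :=
      ⟨(i - ((s + 1 : Nat) : Int)).toNat, by omega⟩
    have e1 : i - (s : Int) = ((k + 1 : Nat) : Int) := by push_cast at hkk ⊢; omega
    rw [e1, hkk, PySem.List.pyGetD_natCast, PySem.List.pyGetD_natCast, List.getD_cons_succ]

lemma pv_fold_idx {α σ : Type} (xs : List α) (d : α) (g : σ → Int → α → σ) (init : σ) :
    (PySem.List.pyRange 0 (xs.length : Int)).foldl
        (fun st i => g st i (PySem.List.pyGetD xs i d)) init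
      = (PySem.List.enumerate xs).foldl (fun st q => g st q.1 q.2) init := by
  have h := pv_fold_idx_aux d g xs 0 init
  simp only [Nat.cast_zero, zero_add] at h
  rw [← h]
  apply PySem.List.foldl_congr_mem
  intro acc i _
  first
  | rfl
  | rw [sub_zero]

lemma pv_foldP {σ : Type} (grid : List (List Int)) (g : σ → Int × Int × Int → σ) (init : σ) :
    (pvP grid).foldl g init
      = (PySem.List.enumerate grid).foldl (fun st p =>
          (PySem.List.enumerate p.2).foldl (fun st q => g st (q.2, p.1, q.1)) st) init := by
  unfold pvP; rw [List.foldl_flatMap]; simp only [List.foldl_map]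

lemma pv_map_fst_pvP (grid : List (List Int)) : (pvP grid).map (·.1) = grid.flatten := by
  unfold pvP
  rw [List.map_flatMap, List.flatMap_def]
  have hp : ∀ p : Int × List Int,
      ((PySem.List.enumerate p.2).map (fun q => (q.2, p.1, q.1))).map
        (fun u : Int × Int × Int => u.1) = p.2 := by
    intro p
    rw [List.map_map]
    have h2 : ((fun u : Int × Int × Int => u.1) ∘ fun q : Int × Int => (q.2, p.1, q.1))
        = (fun q : Int × Int => q.2) := by funext q; rfl
    rw [h2]
    exact PySem.List.map_snd_enumerate p.2 0
  simp only [hp]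
  exact congrArg List.flatten (PySem.List.map_snd_enumerate grid 0)

lemma pv_vs_eq (grid : List (List Int)) : (pvQ grid).map (·.1) = pvVs grid := by
  unfold pvQ pvVs
  rw [← pv_map_fst_pvP grid, List.filter_map]
  congr 1

lemma pv_counts_eq (grid : List (List Int)) :
    pvCountsA grid = PySem.Dict.counter (pvVs grid) := by
  unfold pvCountsA pvVs
  rw [PySem.Dict.counter_eq_foldl, List.foldl_filter, List.foldl_flatten]
  apply PySem.List.foldl_congr_mem
  intro d row _
  apply PySem.List.foldl_congr_mem
  intro d v _
  by_cases h : v = 0 <;> simp [h]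

lemma pv_pos_eq (grid : List (List Int)) :
    pvPosB grid = (pvQ grid).foldl (fun d u => d.modify u.1 [] (· ++ [u.2])) PySem.Dict.empty := by
  unfold pvPosB pvQ
  rw [List.foldl_filter]
  refine Eq.trans ?_ (pv_foldP grid (fun d (u : Int × Int × Int) =>
      if decide (u.1 ≠ 0) = true
      then d.modify u.1 [] (· ++ [u.2]) else d) PySem.Dict.empty).symm
  apply PySem.List.foldl_congr_mem
  intro d p _
  apply PySem.List.foldl_congr_mem
  intro d q _
  by_cases h : q.2 = 0 <;> simp [h]

lemma pv_pos_getD (grid : List (List Int)) (v : Int) :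
    (pvPosB grid).getD v [] = ((pvQ grid).filter (fun u => u.1 == v)).map (·.2) := by
  rw [pv_pos_eq, PySem.Dict.getD_foldl_modify_append, PySem.Dict.getD_empty]
  rfl

lemma pv_pos_keys (grid : List (List Int)) :
    (pvPosB grid).keys = PySem.Set.ofList (pvVs grid) := by
  rw [pv_pos_eq,
    PySem.Dict.keys_foldl_modify_key (pvQ grid) (fun u : Int × Int × Int => u.1) []
      (fun _ u => (· ++ [u.2])) PySem.Dict.empty,
    PySem.Dict.keys_empty, PySem.Set.update_nil_left, pv_vs_eq]

lemma pv_mem_pvP (grid : List (List Int)) (v r c : Int) :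
    (v, r, c) ∈ pvP grid ↔
      0 ≤ r ∧ r < (grid.length : Int) ∧ 0 ≤ c ∧
      c < ((PySem.List.pyGetD grid r []).length : Int) ∧
      PySem.List.pyGetD (PySem.List.pyGetD grid r []) c 0 = v := by
  unfold pvP
  simp only [List.mem_flatMap, List.mem_map, pv_enum_mem, zero_add]
  constructor
  · rintro ⟨p, ⟨i, hi, hp1, hp2⟩, q, ⟨j, hj, hq1, hq2⟩, heq⟩
    obtain ⟨h1, h2, h3⟩ : q.2 = v ∧ p.1 = r ∧ q.1 = c := by
      simpa [Prod.ext_iff] using heq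
    have hr : r = (i : Int) := by omega
    have hc : c = (j : Int) := by omega
    have hrow : PySem.List.pyGetD grid r [] = p.2 := by
      rw [hr, PySem.List.pyGetD_natCast, List.getD_eq_getElem?_getD, hp2]
      rfl
    refine ⟨by omega, by omega, by omega, ?_, ?_⟩
    · rw [hrow, hc]; exact_mod_cast hj
    · rw [hrow, hc, PySem.List.pyGetD_natCast, List.getD_eq_getElem?_getD, hq2]
      exact h1
  · rintro ⟨h0r, hrlen, h0c, hclen, hval⟩
    have hrn : r = ((r.toNat : Nat) : Int) := by omega
    have hcn : c = ((c.toNat : Nat) : Int) := by omega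
    have hrlt : r.toNat < grid.length := by omega
    have hrget : grid[r.toNat]? = some (PySem.List.pyGetD grid r []) := by
      have hval' : PySem.List.pyGetD grid r [] = grid[r.toNat] := by
        conv_lhs => rw [hrn, PySem.List.pyGetD_natCast]
        simp [List.getD_eq_getElem?_getD, List.getElem?_eq_getElem hrlt]
      rw [hval', List.getElem?_eq_getElem hrlt]
    have hclt : c.toNat < (PySem.List.pyGetD grid r []).length := by omega
    have hcget : (PySem.List.pyGetD grid r [])[c.toNat]? = some v := by
      have hval' : PySem.List.pyGetD (PySem.List.pyGetD grid r []) c 0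
          = (PySem.List.pyGetD grid r [])[c.toNat] := by
        conv_lhs => rw [hcn, PySem.List.pyGetD_natCast]
        simp [List.getD_eq_getElem?_getD, List.getElem?_eq_getElem hclt]
      rw [List.getElem?_eq_getElem hclt, ← hval', hval]
    exact ⟨(r, PySem.List.pyGetD grid r []), ⟨r.toNat, hrlt, by omega, hrget⟩,
      (c, v), ⟨c.toNat, hclt, by omega, hcget⟩, rfl⟩

lemma pv_mem_cells (grid : List (List Int)) (t : Int) (ht : t ≠ 0) (rc : Int × Int) :
    rc ∈ pvCellsOf grid t ↔ (t, rc.1, rc.2) ∈ pvP grid := by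
  unfold pvCellsOf pvQ
  simp only [List.mem_map, List.mem_filter, decide_eq_true_eq, beq_iff_eq]
  constructor
  · rintro ⟨u, ⟨⟨hu, _⟩, hut⟩, hsnd⟩
    obtain ⟨u1, u2⟩ := u
    obtain ⟨rc1, rc2⟩ := rc
    simp only at hut hsnd
    subst hut hsnd
    exact hu
  · intro h
    exact ⟨(t, rc.1, rc.2), ⟨⟨h, ht⟩, rfl⟩, rfl⟩

lemma pv_filter_t (grid : List (List Int)) (t : Int) (ht : t ≠ 0) :
    (pvQ grid).filter (fun u => u.1 == t) = (pvP grid).filter (fun u => u.1 == t) := by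
  unfold pvQ
  rw [List.filter_filter]
  apply List.filter_congr
  intro u _
  by_cases h : u.1 = t
  · simp [h, ht]
  · simp [h]

lemma pv_min_if (a b : Int) : (if b < a then b else a) = min a b := by
  rcases le_total a b with h | h <;> (simp [h]; try omega)

lemma pv_max_if (a b : Int) : (if b > a then b else a) = max a b := by
  rcases le_total a b with h | h <;> (simp [h]; try omega)

lemma pv_fold_upd (l : List (Int × Int)) :
    ∀ (st : Int × Int × Int × Int),
      l.foldl (fun st u =>
        (if u.1 < st.1 then u.1 else st.1,
         if u.1 > st.2.1 then u.1 else st.2.1,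
         if u.2 < st.2.2.1 then u.2 else st.2.2.1,
         if u.2 > st.2.2.2 then u.2 else st.2.2.2)) st
      = ((l.map (·.1)).foldl min st.1, (l.map (·.1)).foldl max st.2.1,
         (l.map (·.2)).foldl min st.2.2.1, (l.map (·.2)).foldl max st.2.2.2) := by
  induction l with
  | nil => intro st; rfl
  | cons u l ih =>
    intro st
    simp only [List.foldl_cons, List.map_cons]
    rw [ih, pv_min_if, pv_max_if, pv_min_if, pv_max_if]

lemma pv_box_eq (grid : List (List Int)) (t cols : Int) (ht : t ≠ 0)
    (hcols : ∀ row ∈ grid, (row.length : Int) = cols) :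
    pvBoxA grid t grid.length cols =
      (((pvCellsOf grid t).map (·.1)).foldl min (grid.length : Int),
       ((pvCellsOf grid t).map (·.1)).foldl max (-1),
       ((pvCellsOf grid t).map (·.2)).foldl min cols,
       ((pvCellsOf grid t).map (·.2)).foldl max (-1)) := by
  unfold pvBoxA
  calc
    (PySem.List.pyRange 0 (grid.length : Int)).foldl (fun st r =>
        (PySem.List.pyRange 0 cols).foldl (fun st c =>
          if PySem.List.pyGetD (PySem.List.pyGetD grid r []) c 0 = t then
            (if r < st.1 then r else st.1,
             if r > st.2.1 then r else st.2.1,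
             if c < st.2.2.1 then c else st.2.2.1,
             if c > st.2.2.2 then c else st.2.2.2)
          else st) st) ((grid.length : Int), -1, cols, -1)
      = (PySem.List.enumerate grid).foldl (fun st p =>
          (PySem.List.pyRange 0 cols).foldl (fun st c =>
            if PySem.List.pyGetD p.2 c 0 = t then
              (if p.1 < st.1 then p.1 else st.1,
               if p.1 > st.2.1 then p.1 else st.2.1,
               if c < st.2.2.1 then c else st.2.2.1,
               if c > st.2.2.2 then c else st.2.2.2)
            else st) st) ((grid.length : Int), -1, cols, -1) :=
        pv_fold_idx grid [] (fun st r row =>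
          (PySem.List.pyRange 0 cols).foldl (fun st c =>
            if PySem.List.pyGetD row c 0 = t then
              (if r < st.1 then r else st.1,
               if r > st.2.1 then r else st.2.1,
               if c < st.2.2.1 then c else st.2.2.1,
               if c > st.2.2.2 then c else st.2.2.2)
            else st) st) _
    _ = (PySem.List.enumerate grid).foldl (fun st p =>
          (PySem.List.enumerate p.2).foldl (fun st q =>
            if q.2 = t then
              (if p.1 < st.1 then p.1 else st.1,
               if p.1 > st.2.1 then p.1 else st.2.1,
               if q.1 < st.2.2.1 then q.1 else st.2.2.1,
               if q.1 > st.2.2.2 then q.1 else st.2.2.2)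
            else st) st) ((grid.length : Int), -1, cols, -1) := by
        apply PySem.List.foldl_congr_mem
        intro acc p hp
        have hrow : p.2 ∈ grid := by
          have := List.mem_map_of_mem (f := fun x : Int × List Int => x.2) hp
          rwa [PySem.List.map_snd_enumerate] at this
        rw [← hcols p.2 hrow]
        exact pv_fold_idx p.2 0 (fun st c v =>
          if v = t then
            (if p.1 < st.1 then p.1 else st.1,
             if p.1 > st.2.1 then p.1 else st.2.1,
             if c < st.2.2.1 then c else st.2.2.1,
             if c > st.2.2.2 then c else st.2.2.2)
          else st) acc
    _ = (pvP grid).foldl (fun st u =>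
          if u.1 = t then
            (if u.2.1 < st.1 then u.2.1 else st.1,
             if u.2.1 > st.2.1 then u.2.1 else st.2.1,
             if u.2.2 < st.2.2.1 then u.2.2 else st.2.2.1,
             if u.2.2 > st.2.2.2 then u.2.2 else st.2.2.2)
          else st) ((grid.length : Int), -1, cols, -1) :=
        (pv_foldP grid (fun st (u : Int × Int × Int) =>
          if u.1 = t then
            (if u.2.1 < st.1 then u.2.1 else st.1,
             if u.2.1 > st.2.1 then u.2.1 else st.2.1,
             if u.2.2 < st.2.2.1 then u.2.2 else st.2.2.1,
             if u.2.2 > st.2.2.2 then u.2.2 else st.2.2.2)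
          else st) ((grid.length : Int), -1, cols, -1)).symm
    _ = ((pvP grid).filter (fun u => u.1 == t)).foldl (fun st u =>
          (if u.2.1 < st.1 then u.2.1 else st.1,
           if u.2.1 > st.2.1 then u.2.1 else st.2.1,
           if u.2.2 < st.2.2.1 then u.2.2 else st.2.2.1,
           if u.2.2 > st.2.2.2 then u.2.2 else st.2.2.2)) ((grid.length : Int), -1, cols, -1) := by
        rw [List.foldl_filter]
        apply PySem.List.foldl_congr_mem
        intro acc u _
        by_cases h : u.1 = t <;> simp [h]
    _ = (pvCellsOf grid t).foldl (fun st rc =>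
          (if rc.1 < st.1 then rc.1 else st.1,
           if rc.1 > st.2.1 then rc.1 else st.2.1,
           if rc.2 < st.2.2.1 then rc.2 else st.2.2.1,
           if rc.2 > st.2.2.2 then rc.2 else st.2.2.2)) ((grid.length : Int), -1, cols, -1) := by
        rw [← pv_filter_t grid t ht]
        unfold pvCellsOf
        rw [List.foldl_map]
    _ = (((pvCellsOf grid t).map (·.1)).foldl min (grid.length : Int),
         ((pvCellsOf grid t).map (·.1)).foldl max (-1),
         ((pvCellsOf grid t).map (·.2)).foldl min cols,
         ((pvCellsOf grid t).map (·.2)).foldl max (-1)) := pv_fold_upd _ _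

theorem pv_main (grid : List (List Int)) (hpre : Pre_transform grid) :
    transform grid = transform_alt grid := by
  obtain ⟨hrect, hex⟩ := hpre
  obtain ⟨row0, hrow0, v0, hv0, hv0ne⟩ := hex
  have hgne : grid ≠ [] := List.ne_nil_of_mem hrow0
  have hlen0 : grid.length ≠ 0 := by simpa [List.length_eq_zero_iff] using hgne
  have hhead : PySem.List.pyGetD grid (0 : Int) [] = grid.headD [] := by
    cases grid with
    | nil => cases hgne rfl
    | cons g gs =>
      rw [show (0 : Int) = ((0 : Nat) : Int) by simp, PySem.List.pyGetD_natCast]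
      rfl
  have hcols : ∀ row ∈ grid,
      (row.length : Int) = ((PySem.List.pyGetD grid (0 : Int) []).length : Int) := by
    intro row hr
    rw [hhead]
    exact_mod_cast hrect row hr
  have hA : (pvCountsA grid).keys = PySem.Set.ofList (pvVs grid) := by
    rw [pv_counts_eq, PySem.Dict.keys_counter]
  have hkA : (fun c => (pvCountsA grid).getD c 0) = fun v => ((pvVs grid).count v : Int) := by
    funext c
    rw [pv_counts_eq, PySem.Dict.getD_counter]
  have hkB : (fun v => (((pvPosB grid).getD v []).length : Int))
      = fun v => ((pvVs grid).count v : Int) := by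
    funext v
    rw [pv_pos_getD, List.length_map, ← List.countP_eq_length_filter, ← pv_vs_eq grid,
      List.count_eq_countP, List.countP_map]
    rfl
  simp only [transform, transform_alt]
  rw [hA, hkA, pv_pos_keys grid, hkB]
  rcases hE : PySem.List.min2? (PySem.Set.ofList (pvVs grid))
      (fun v => ((pvVs grid).count v : Int)) (fun v => v) with _ | t
  · rfl
  · simp only []
    have ht0 : t ∈ pvVs grid := by
      have h := pv_min2?_mem hE
      rwa [PySem.Set.mem_ofList] at h
    have htne : t ≠ 0 := by
      have h := ht0
      unfold pvVs at h
      simp only [List.mem_filter, decide_eq_true_eq] at h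
      exact h.2
    have hcne : pvCellsOf grid t ≠ [] := by
      rw [← pv_vs_eq grid] at ht0
      obtain ⟨u, hu, hu1⟩ := List.mem_map.mp ht0
      have hm : u.2 ∈ pvCellsOf grid t := by
        unfold pvCellsOf
        exact List.mem_map_of_mem (List.mem_filter.mpr ⟨hu, by simp [hu1]⟩)
      exact List.ne_nil_of_mem hm
    obtain ⟨rc0, rest, hcells⟩ := List.exists_cons_of_ne_nil hcne
    have hbound : ∀ rc ∈ pvCellsOf grid t,
        0 ≤ rc.1 ∧ rc.1 < (grid.length : Int) ∧ 0 ≤ rc.2 ∧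
        rc.2 < ((PySem.List.pyGetD grid (0 : Int) []).length : Int) := by
      intro rc h
      have hm := (pv_mem_cells grid t htne rc).mp h
      obtain ⟨b1, b2, b3, b4, b5⟩ := (pv_mem_pvP grid t rc.1 rc.2).mp hm
      have hrowmem : PySem.List.pyGetD grid rc.1 [] ∈ grid := by
        rw [show rc.1 = ((rc.1.toNat : Nat) : Int) by omega, PySem.List.pyGetD_natCast,
          List.getD_eq_getElem?_getD,
          List.getElem?_eq_getElem (by omega : rc.1.toNat < grid.length)]
        exact List.getElem_mem _
      have hc := hcols _ hrowmem
      exact ⟨b1, b2, b3, by omega⟩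
    have hgd : (pvPosB grid).getD t [] = pvCellsOf grid t := by
      rw [pv_pos_getD grid t]
      rfl
    simp only [if_pos hlen0]
    rw [pv_box_eq grid t _ htne hcols, hgd, hcells]
    have h0 := hbound rc0 (by rw [hcells]; exact List.mem_cons_self)
    simp only [List.map_cons, List.foldl_cons, PySem.List.min?_id_cons, PySem.List.max?_id_cons,
      Option.getD_some]
    rw [min_eq_right (le_of_lt h0.2.1), max_eq_right (by omega : (-1 : Int) ≤ rc0.1),
      min_eq_right (le_of_lt h0.2.2.2), max_eq_right (by omega : (-1 : Int) ≤ rc0.2)]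
    have hmr : 0 ≤ (rest.map (·.1)).foldl min rc0.1 := by
      rcases PySem.List.foldl_min_mem (rest.map (·.1)) rc0.1 with h | h
      · rw [h]; exact h0.1
      · obtain ⟨rc, hrc, hrc1⟩ := List.mem_map.mp h
        rw [← hrc1]
        exact (hbound rc (by rw [hcells]; exact List.mem_cons_of_mem _ hrc)).1
    have hMr : (rest.map (·.1)).foldl max rc0.1 < (grid.length : Int) := by
      rcases PySem.List.foldl_max_mem (rest.map (·.1)) rc0.1 with h | h
      · rw [h]; exact h0.2.1
      · obtain ⟨rc, hrc, hrc1⟩ := List.mem_map.mp h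
        rw [← hrc1]
        exact (hbound rc (by rw [hcells]; exact List.mem_cons_of_mem _ hrc)).2.1
    have hmc : 0 ≤ (rest.map (·.2)).foldl min rc0.2 := by
      rcases PySem.List.foldl_min_mem (rest.map (·.2)) rc0.2 with h | h
      · rw [h]; exact h0.2.2.1
      · obtain ⟨rc, hrc, hrc1⟩ := List.mem_map.mp h
        rw [← hrc1]
        exact (hbound rc (by rw [hcells]; exact List.mem_cons_of_mem _ hrc)).2.2.1
    have hMc : (rest.map (·.2)).foldl max rc0.2
        < ((PySem.List.pyGetD grid (0 : Int) []).length : Int) := by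
      rcases PySem.List.foldl_max_mem (rest.map (·.2)) rc0.2 with h | h
      · rw [h]; exact h0.2.2.2
      · obtain ⟨rc, hrc, hrc1⟩ := List.mem_map.mp h
        rw [← hrc1]
        exact (hbound rc (by rw [hcells]; exact List.mem_cons_of_mem _ hrc)).2.2.2
    simp only [PySem.List.foldl_append_singleton_eq_map, List.nil_append]
    apply List.map_congr_left
    intro r hr
    apply List.map_congr_left
    intro c hc
    obtain ⟨hr1, hr2⟩ := PySem.List.mem_pyRange_one.mp hr
    obtain ⟨hc1, hc2⟩ := PySem.List.mem_pyRange_one.mp hc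
    have hrowmem : PySem.List.pyGetD grid r [] ∈ grid := by
      rw [show r = ((r.toNat : Nat) : Int) by omega, PySem.List.pyGetD_natCast,
        List.getD_eq_getElem?_getD,
        List.getElem?_eq_getElem (by omega : r.toNat < grid.length)]
      exact List.getElem_mem _
    have hrl := hcols _ hrowmem
    have hiff : PySem.List.pyGetD (PySem.List.pyGetD grid r []) c 0 = t ↔
        (r, c) ∈ pvCellsOf grid t := by
      rw [pv_mem_cells grid t htne (r, c)]
      rw [pv_mem_pvP grid t r c]
      constructor
      · intro hv
        exact ⟨by omega, by omega, by omega, by omega, hv⟩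
      · intro h
        exact h.2.2.2.2
    have hcont : PySem.Set.contains (PySem.Set.ofList (rc0 :: rest)) (r, c) = true ↔
        (r, c) ∈ pvCellsOf grid t := by
      rw [PySem.Set.contains_iff, PySem.Set.mem_ofList, ← hcells]
    by_cases h : PySem.List.pyGetD (PySem.List.pyGetD grid r []) c 0 = t
    · rw [if_pos h, if_pos (hcont.mpr (hiff.mp h))]
    · rw [if_neg h, if_neg (by
        intro hcc
        exact h (hiff.mpr (hcont.mp hcc)))]

-- ===== VERDICT (by name: the statement is the Claim_ definition above) =====
theorem transform_spec : Claim_equal_transform := by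
  intro grid _ hpre
  exact pv_main grid hpre
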